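-- pv_equiv track=rewrite | github.com/DongGeun974/Practice_gongsu | 20190919.py | sum_of_3s
-- ===== SOURCE A (Python) =====
-- def sum_of_3s(n) :
--     sum = 0
--     for i in range(1, n+1):
--         if (i%3 == 0) :
--             sum += i
--         elif "3" in str(i) :
--             sum += i
--
--     return sum
-- ===== SOURCE B (Python) =====
-- def sum_of_3s(n):
--     # closed-form triangular sum for the multiples of 3, plus the
--     # non-multiples of 3 that contain the digit 3
--     if n < 1:
--         return 0
--     k = n // 3
--     tri = 3 * k * (k + 1) // 2
--     return tri + sum(i for i in range(1, n + 1) if i % 3 != 0 and "3" in str(i))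
-- ===== Notes on version B (the rewrite author's own statement) =====
-- stated objective: alternative
-- what changed: B replaces A's single accumulating loop over every i with a closed-form triangular-number formula 3*k*(k+1)//2 for the multiples of 3 (k = n//3) plus a filtered sum over only the non-multiples of 3 that contain the digit 3.
import Mathlib
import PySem

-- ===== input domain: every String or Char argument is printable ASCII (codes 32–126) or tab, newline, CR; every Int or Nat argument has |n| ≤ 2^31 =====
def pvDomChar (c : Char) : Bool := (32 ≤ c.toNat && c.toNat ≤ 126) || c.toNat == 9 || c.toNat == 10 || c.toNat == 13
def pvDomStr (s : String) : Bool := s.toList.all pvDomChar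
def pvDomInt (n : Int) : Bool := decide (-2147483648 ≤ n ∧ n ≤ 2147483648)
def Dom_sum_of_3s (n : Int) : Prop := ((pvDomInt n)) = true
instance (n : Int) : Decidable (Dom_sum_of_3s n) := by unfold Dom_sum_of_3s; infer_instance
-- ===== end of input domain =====

-- B replaces A's single accumulating loop with a closed-form triangular sum for the
-- multiples of 3 plus a filtered sum over only non-multiples containing digit 3 (alternative).

-- ===== PORT A =====
def sum_of_3s (n : Int) : Int :=
  (PySem.List.pyRange 1 (n + 1) 1).foldl
    (fun s i =>
      if PySem.Int.mod i 3 = 0 then s + i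
      else if PySem.Str.isIn "3" (PySem.Int.toStr i) then s + i
      else s) 0

-- ===== PORT B =====
def sum_of_3s_alt (n : Int) : Int :=
  if n < 1 then 0
  else
    let k := PySem.Int.floordiv n 3
    let tri := PySem.Int.floordiv (3 * k * (k + 1)) 2
    tri + (PySem.List.pyRange 1 (n + 1) 1).foldl
      (fun s i =>
        if PySem.Int.mod i 3 ≠ 0 ∧ PySem.Str.isIn "3" (PySem.Int.toStr i) then s + i
        else s) 0

-- ===== PRECONDITION & SPEC =====
def Spec_sum_of_3s (n : Int) (out : Int) : Prop := out = sum_of_3s_alt n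
instance (n : Int) (out : Int) : Decidable (Spec_sum_of_3s n out) := by unfold Spec_sum_of_3s; infer_instance

-- ===== CLAIM (what is proved, stated in full; the proofs are below) =====
def Claim_equal_sum_of_3s : Prop := ∀ (n : Int), Dom_sum_of_3s n → Spec_sum_of_3s n (sum_of_3s n)

-- ===== LEMMAS AND PROOFS =====

-- per-element contributions of A's loop and B's filtered sum
def pvCA (i : Int) : Int :=
  if PySem.Int.mod i 3 = 0 then i
  else if PySem.Str.isIn "3" (PySem.Int.toStr i) then i else 0

def pvCB (i : Int) : Int :=
  if PySem.Int.mod i 3 ≠ 0 ∧ PySem.Str.isIn "3" (PySem.Int.toStr i) then i else 0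

-- B's closed-form part as a function of the bound
def pvTri (n : Int) : Int :=
  PySem.Int.floordiv (3 * PySem.Int.floordiv n 3 * (PySem.Int.floordiv n 3 + 1)) 2

lemma pvCA_eq (i : Int) :
    pvCA i = (if PySem.Int.mod i 3 = 0 then i else 0) + pvCB i := by
  unfold pvCA pvCB
  split_ifs with h1 h2 h3 h4 <;> first | tauto | ring

lemma pvTri_step (n : Int) :
    pvTri (n + 1) = pvTri n + (if PySem.Int.mod (n + 1) 3 = 0 then n + 1 else 0) := by
  unfold pvTri
  simp only [PySem.Int.floordiv_eq_ediv_of_pos (show (0:Int) < 3 by norm_num),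
    PySem.Int.floordiv_eq_ediv_of_pos (show (0:Int) < 2 by norm_num),
    PySem.Int.mod_eq_emod_of_pos (show (0:Int) < 3 by norm_num)]
  by_cases h3 : (n + 1) % 3 = 0
  · have hk : (n + 1) / 3 = n / 3 + 1 := by omega
    rw [hk, if_pos h3]
    have hval : n + 1 = 3 * (n / 3 + 1) := by omega
    have hprod : 3 * (n / 3 + 1) * (n / 3 + 1 + 1) =
        3 * (n / 3) * (n / 3 + 1) + 2 * (3 * (n / 3 + 1)) := by ring
    rw [hprod]
    generalize 3 * (n / 3) * (n / 3 + 1) = a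
    omega
  · have hk : (n + 1) / 3 = n / 3 := by omega
    rw [hk, if_neg h3, add_zero]

lemma pvFoldA_sum (l : List Int) (s : Int) :
    l.foldl (fun s i =>
      if PySem.Int.mod i 3 = 0 then s + i
      else if PySem.Str.isIn "3" (PySem.Int.toStr i) then s + i
      else s) s = s + (l.map pvCA).sum := by
  induction l generalizing s with
  | nil => simp
  | cons x t ih =>
    simp only [List.foldl_cons, List.map_cons, List.sum_cons, ih]
    unfold pvCA
    split_ifs <;> ring

lemma pvFoldB_sum (l : List Int) (s : Int) :
    l.foldl (fun s i =>
      if PySem.Int.mod i 3 ≠ 0 ∧ PySem.Str.isIn "3" (PySem.Int.toStr i) then s + i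
      else s) s = s + (l.map pvCB).sum := by
  induction l generalizing s with
  | nil => simp
  | cons x t ih =>
    simp only [List.foldl_cons, List.map_cons, List.sum_cons, ih]
    unfold pvCB
    split_ifs <;> ring

lemma pvMain (m : Nat) :
    ((PySem.List.pyRange 1 ((m : Int) + 1) 1).map pvCA).sum =
      pvTri (m : Int) + ((PySem.List.pyRange 1 ((m : Int) + 1) 1).map pvCB).sum := by
  induction m with
  | zero => simp [PySem.List.pyRange_one_eq_nil, pvTri, PySem.Int.floordiv]
  | succ m ih =>
    have hc : ((m + 1 : Nat) : Int) = (m : Int) + 1 := by push_cast; ring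
    rw [hc]
    rw [PySem.List.pyRange_one_succ_right (a := 1) (b := (m : Int) + 1) (by omega)]
    simp only [List.map_append, List.sum_append, List.map_cons, List.map_nil,
      List.sum_cons, List.sum_nil]
    rw [ih, pvCA_eq, pvTri_step (m : Int)]
    ring

-- ===== VERDICT (by name: the statement is the Claim_ definition above) =====
theorem sum_of_3s_spec : Claim_equal_sum_of_3s := by
  intro n _
  unfold Spec_sum_of_3s sum_of_3s sum_of_3s_alt
  by_cases hlt : n < 1
  · rw [PySem.List.pyRange_one_eq_nil (by omega)]
    simp [hlt]
  · simp only [if_neg hlt]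
    rw [pvFoldA_sum, pvFoldB_sum]
    have hn : n = ((n.toNat : Nat) : Int) := by omega
    rw [hn, pvMain n.toNat]
    unfold pvTri
    ring
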